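-- pv_equiv track=rewrite | github.com/Siddharthsharma633/Fuxenpruefung | src/fuxenpruefung.py | change_catagories
-- ===== SOURCE A (Python) =====
-- def change_catagories(category, categoryUpdate):
--     for key in categoryUpdate.keys():
--         try:
--             idx = list(map(lambda a: a[2], category)).index(key)
--         except ValueError:
--             continue
--         category[idx][0] = categoryUpdate[key]
--     return category
-- ===== SOURCE B (Python) =====
-- def change_catagories(category, categoryUpdate):
--     remaining = dict(categoryUpdate)
--     for row in category:
--         if not remaining:
--             break
--         if row[2] in remaining:
--             row[0] = remaining.pop(row[2])
--     return category
-- ===== Notes on version B (the rewrite author's own statement) =====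
-- stated objective: faster
-- what changed: Replaces A's loop over update keys with an inner list(map(...)).index rescan of all rows per key by a single forward pass over the rows that looks each row's key up in a mutable copy of the update dict, pops it once applied, and breaks out when no updates remain.
import Mathlib
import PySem

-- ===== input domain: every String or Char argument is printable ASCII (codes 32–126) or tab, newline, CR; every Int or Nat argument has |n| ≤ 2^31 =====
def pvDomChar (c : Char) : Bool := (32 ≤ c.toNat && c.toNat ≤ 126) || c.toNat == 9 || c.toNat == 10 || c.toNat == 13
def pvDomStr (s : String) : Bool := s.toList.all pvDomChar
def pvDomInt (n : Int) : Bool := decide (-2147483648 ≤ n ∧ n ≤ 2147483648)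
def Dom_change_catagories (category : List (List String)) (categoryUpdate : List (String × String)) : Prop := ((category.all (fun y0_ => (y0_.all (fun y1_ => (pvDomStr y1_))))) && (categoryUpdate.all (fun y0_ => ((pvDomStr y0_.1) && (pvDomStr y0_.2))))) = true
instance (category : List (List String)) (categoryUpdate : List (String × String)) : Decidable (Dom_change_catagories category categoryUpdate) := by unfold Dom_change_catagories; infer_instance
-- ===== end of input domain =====

-- B replaces A's per-key rescan of all rows with one forward pass over the rows consuming a
-- mutable copy of the update dict, breaking out once every update is applied (O(U+C) instead of
-- O(U*C)). Both Pythons mutate the matched rows of `category` in place in the same way; the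
-- theorem is about the returned value.

-- ===== PORT A =====
-- one step of A's `for key in categoryUpdate.keys()` loop body
def pvStepA (cat : List (List String)) (kv : String × String) : List (List String) :=
  match PySem.List.index? (cat.map (fun a => PySem.List.pyGet? a 2)) (some kv.1) with
  | none => cat                                   -- ValueError: continue
  | some idx => cat.modify idx (fun row => row.set 0 kv.2)   -- category[idx][0] = categoryUpdate[key]

def change_catagories (category : List (List String)) (categoryUpdate : List (String × String)) : List (List String) :=
  categoryUpdate.foldl pvStepA category

-- ===== PORT B =====
-- B's single pass; `rem` is the items list of the mutable copy `dict(categoryUpdate)` (unique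
-- keys), so dict lookup = first match in `rem` and dict pop = that lookup + erasing the entry.
def pvGoB : List (List String) → List (String × String) → List (List String)
  | cat, [] => cat                                -- if not remaining: break
  | [], _ => []
  | row :: rest, rem =>
    match PySem.List.pyGet? row 2 with            -- row[2] (IndexError on a short row is outside Pre_;
    | none => row :: pvGoB rest rem               --   the port skips such a row there)
    | some k =>
      match List.lookup k rem with                -- row[2] in remaining
      | none => row :: pvGoB rest rem
      | some v => (row.set 0 v) :: pvGoB rest (rem.eraseP (fun p => p.1 == k))  -- remaining.pop

def change_catagories_alt (category : List (List String)) (categoryUpdate : List (String × String)) : List (List String) :=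
  pvGoB category (PySem.Dict.ofList categoryUpdate).items     -- remaining = dict(categoryUpdate)

-- ===== PRECONDITION & SPEC =====
-- Pre_ excludes exactly the inputs on which Python A raises IndexError: a nonempty update
-- together with a row shorter than 3 entries (the `lambda a: a[2]` fails on that row).
def Pre_change_catagories (category : List (List String)) (categoryUpdate : List (String × String)) : Prop :=
  categoryUpdate = [] ∨ ∀ row ∈ category, 3 ≤ row.length
instance (category : List (List String)) (categoryUpdate : List (String × String)) : Decidable (Pre_change_catagories category categoryUpdate) := by unfold Pre_change_catagories; infer_instance
def pvWitness_change_catagories : List (List String) × (List (String × String)) :=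
  ([["a", "b", "c"], ["x", "y", "z"]], [("z", "new"), ("q", "r")])

def Spec_change_catagories (category : List (List String)) (categoryUpdate : List (String × String)) (out : List (List String)) : Prop := out = change_catagories_alt category categoryUpdate
instance (category : List (List String)) (categoryUpdate : List (String × String)) (out : List (List String)) : Decidable (Spec_change_catagories category categoryUpdate out) := by unfold Spec_change_catagories; infer_instance

-- ===== CLAIM (what is proved, stated in full; the proofs are below) =====
def Claim_equal_change_catagories : Prop := ∀ (category : List (List String)) (categoryUpdate : List (String × String)), Dom_change_catagories category categoryUpdate → Pre_change_catagories category categoryUpdate → Spec_change_catagories category categoryUpdate (change_catagories category categoryUpdate)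

-- ===== LEMMAS AND PROOFS =====

theorem pvGoB_nil_rem (cat : List (List String)) : pvGoB cat [] = cat := by
  cases cat <;> rfl

theorem pvLookup_eq_none {α β : Type} [BEq α] [LawfulBEq α] (rem : List (α × β)) (a : α)
    (h : ∀ p ∈ rem, p.1 ≠ a) : List.lookup a rem = none := by
  induction rem with
  | nil => rfl
  | cons p l ih =>
    obtain ⟨k, v⟩ := p
    rw [List.lookup_cons]
    have hk : (k : α) ≠ a := h (k, v) (by simp)
    have : (a == k) = false := beq_eq_false_iff_ne.mpr (fun e => hk e.symm)
    rw [this]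
    exact ih (fun q hq => h q (List.mem_cons_of_mem _ hq))

theorem pvGet2_set0 (row : List String) (v : String) :
    PySem.List.pyGet? (row.set 0 v) 2 = PySem.List.pyGet? row 2 := by
  rw [PySem.List.pyGet?_of_nonneg _ (by norm_num), PySem.List.pyGet?_of_nonneg _ (by norm_num)]
  exact List.getElem?_set_ne (by decide)

theorem pvStepA_cons_of_ne (row : List String) (rest : List (List String)) (kv : String × String)
    (t : String) (ht : PySem.List.pyGet? row 2 = some t) (hne : t ≠ kv.1) :
    pvStepA (row :: rest) kv = row :: pvStepA rest kv := by
  unfold pvStepA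
  simp only [List.map_cons, ht]
  rw [PySem.List.index?_cons_of_ne _ (by simpa using hne)]
  cases PySem.List.index? (rest.map (fun a => PySem.List.pyGet? a 2)) (some kv.1) with
  | none => simp
  | some i => simp [List.modify]

theorem pvKeyLemma (cat : List (List String)) (rem : List (String × String)) (k v : String)
    (hrows : ∀ row ∈ cat, 3 ≤ row.length) (hk : ∀ p ∈ rem, p.1 ≠ k) :
    pvGoB (pvStepA cat (k, v)) rem = pvGoB cat ((k, v) :: rem) := by
  induction cat generalizing rem with
  | nil =>
    unfold pvStepA
    cases rem <;> rfl
  | cons row rest ih =>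
    have hrow : 3 ≤ row.length := hrows row (by simp)
    have hrest : ∀ r ∈ rest, 3 ≤ r.length := fun r hr => hrows r (by simp [hr])
    obtain ⟨t, ht⟩ : ∃ t, PySem.List.pyGet? row 2 = some t := by
      rw [PySem.List.pyGet?_of_nonneg _ (by norm_num)]
      exact ⟨_, List.getElem?_eq_getElem (by omega)⟩
    by_cases htk : t = k
    · -- head row matches the key: A updates it here; B consumes (k, v) here
      subst htk
      have hstep : pvStepA (row :: rest) (t, v) = (row.set 0 v) :: rest := by
        unfold pvStepA
        simp only [List.map_cons, ht]
        rw [PySem.List.index?_cons_self]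
        simp [List.modify]
      rw [hstep]
      have hE : List.eraseP (fun p => p.1 == t) (((t, v) : String × String) :: rem) = rem :=
        List.eraseP_cons_of_pos (by simp)
      cases rem with
      | nil =>
        show (row.set 0 v) :: rest = pvGoB (row :: rest) [(t, v)]
        unfold pvGoB
        simp only [ht, List.lookup_cons, BEq.rfl, hE, pvGoB_nil_rem]
      | cons q rem' =>
        unfold pvGoB
        simp only [pvGet2_set0 row v, ht, pvLookup_eq_none (q :: rem') t hk, List.lookup_cons,
          BEq.rfl, hE]
    · rw [pvStepA_cons_of_ne row rest (k, v) t ht htk]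
      have hne : (t == k) = false := beq_eq_false_iff_ne.mpr htk
      cases rem with
      | nil =>
        show row :: pvStepA rest (k, v) = pvGoB (row :: rest) [(k, v)]
        unfold pvGoB
        simp only [ht, List.lookup_cons, hne]
        rw [← ih [] hrest (by simp), pvGoB_nil_rem]
        rfl
      | cons q rem' =>
        unfold pvGoB
        have hlk : List.lookup t ((k, v) :: q :: rem') = List.lookup t (q :: rem') := by
          rw [List.lookup_cons, hne]
        simp only [ht, hlk]
        cases hfind : List.lookup t (q :: rem') with
        | none => simp [ih (q :: rem') hrest hk]
        | some v' =>
          have hkE : ∀ p ∈ (q :: rem').eraseP (fun p => p.1 == t), p.1 ≠ k :=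
            fun p hp => hk p (List.mem_of_mem_eraseP hp)
          have hE : List.eraseP (fun p => p.1 == t) ((k, v) :: q :: rem')
              = (k, v) :: (q :: rem').eraseP (fun p => p.1 == t) := by
            rw [List.eraseP_cons_of_neg (by simpa using fun e => htk e.symm)]
          simp [hE, ih ((q :: rem').eraseP (fun p => p.1 == t)) hrest hkE]

theorem pvMemModify {α : Type} {r : α} {l : List α} {i : Nat} {f : α → α}
    (hr : r ∈ l.modify i f) : r ∈ l ∨ ∃ r' ∈ l, r = f r' := by
  induction l generalizing i with
  | nil => cases i <;> simp [List.modify, List.modifyTailIdx, List.modifyTailIdx.go,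
      List.modifyHead] at hr
  | cons x xs ih =>
    cases i with
    | zero =>
      simp [List.modify] at hr
      rcases hr with h1 | h2
      · exact Or.inr ⟨x, by simp, h1⟩
      · exact Or.inl (by simp [h2])
    | succ n =>
      simp [List.modify] at hr
      rcases hr with h1 | h2
      · exact Or.inl (by simp [h1])
      · rcases ih h2 with hm | ⟨r', hr', he⟩
        · exact Or.inl (by simp [hm])
        · exact Or.inr ⟨r', by simp [hr'], he⟩

theorem pvRow_mem_stepA {cat : List (List String)} {kv : String × String} {r : List String}
    (hr : r ∈ pvStepA cat kv) : r ∈ cat ∨ ∃ r' ∈ cat, r = r'.set 0 kv.2 := by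
  unfold pvStepA at hr
  cases h : PySem.List.index? (cat.map (fun a => PySem.List.pyGet? a 2)) (some kv.1) with
  | none => rw [h] at hr; exact Or.inl hr
  | some i => rw [h] at hr; exact pvMemModify hr

theorem pvStepA_rows_long {cat : List (List String)} {kv : String × String}
    (h : ∀ row ∈ cat, 3 ≤ row.length) : ∀ row ∈ pvStepA cat kv, 3 ≤ row.length := by
  intro row hrow
  rcases pvRow_mem_stepA hrow with hm | ⟨r', hr', hset⟩
  · exact h row hm
  · rw [hset, List.length_set]; exact h r' hr'

theorem pvMain (upd : List (String × String)) (cat : List (List String))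
    (hrows : ∀ row ∈ cat, 3 ≤ row.length) (hnd : (upd.map (fun p => p.1)).Nodup) :
    upd.foldl pvStepA cat = pvGoB cat upd := by
  induction upd generalizing cat with
  | nil => simp [pvGoB_nil_rem]
  | cons kv rest ih =>
    obtain ⟨k, v⟩ := kv
    simp only [List.map_cons, List.nodup_cons] at hnd
    have hk : ∀ p ∈ rest, p.1 ≠ k := by
      intro p hp he
      exact hnd.1 (he ▸ List.mem_map_of_mem hp)
    rw [List.foldl_cons, ih (pvStepA cat (k, v)) (pvStepA_rows_long hrows) hnd.2,
        pvKeyLemma cat rest k v hrows hk]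

-- ===== reduction of A's fold over a duplicate-key list to the fold over dict(categoryUpdate) =====

theorem pvMapF2_modify (l : List (List String)) (i : Nat) (v : String) :
    (l.modify i (fun row => row.set 0 v)).map (fun a => PySem.List.pyGet? a 2)
      = l.map (fun a => PySem.List.pyGet? a 2) := by
  induction l generalizing i with
  | nil => cases i <;> rfl
  | cons x xs ih =>
    cases i with
    | zero => simp [List.modify, pvGet2_set0]
    | succ n => simp [List.modify]; simpa [List.modify] using ih n

theorem pvThirds_stepA (cat : List (List String)) (kv : String × String) :
    (pvStepA cat kv).map (fun a => PySem.List.pyGet? a 2)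
      = cat.map (fun a => PySem.List.pyGet? a 2) := by
  unfold pvStepA
  cases h : PySem.List.index? (cat.map (fun a => PySem.List.pyGet? a 2)) (some kv.1) with
  | none => rfl
  | some i => exact pvMapF2_modify cat i kv.2

-- evaluate a step through the invariance of the third column
theorem pvStepA_eval (c cat : List (List String)) (kv : String × String)
    (hmap : c.map (fun a => PySem.List.pyGet? a 2) = cat.map (fun a => PySem.List.pyGet? a 2)) :
    pvStepA c kv = match PySem.List.index? (cat.map (fun a => PySem.List.pyGet? a 2)) (some kv.1) with
      | none => c
      | some idx => c.modify idx (fun row => row.set 0 kv.2) := by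
  unfold pvStepA
  rw [hmap]

theorem pvModify_modify_same (l : List (List String)) (i : Nat) (v1 v2 : String) :
    (l.modify i (fun row => row.set 0 v1)).modify i (fun row => row.set 0 v2)
      = l.modify i (fun row => row.set 0 v2) := by
  induction l generalizing i with
  | nil => cases i <;> rfl
  | cons x xs ih =>
    cases i with
    | zero => simp [List.modify, List.set_set]
    | succ n => simp [List.modify]; simpa [List.modify] using ih n

theorem pvModify_modify_comm {α : Type} (l : List α) (i j : Nat) (f g : α → α) (h : i ≠ j) :
    (l.modify i f).modify j g = (l.modify j g).modify i f := by
  induction l generalizing i j with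
  | nil => cases i <;> cases j <;> rfl
  | cons x xs ih =>
    cases i with
    | zero =>
      cases j with
      | zero => exact absurd rfl h
      | succ m => simp [List.modify]
    | succ n =>
      cases j with
      | zero => simp [List.modify]
      | succ m => simp [List.modify]; simpa [List.modify] using ih n m (by omega)

theorem pvStepA_same_key (cat : List (List String)) (k v1 v2 : String) :
    pvStepA (pvStepA cat (k, v1)) (k, v2) = pvStepA cat (k, v2) := by
  rw [pvStepA_eval (pvStepA cat (k, v1)) cat (k, v2) (pvThirds_stepA cat (k, v1))]
  cases h : PySem.List.index? (cat.map (fun a => PySem.List.pyGet? a 2)) (some k) with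
  | none =>
    have h1 : pvStepA cat (k, v1) = cat := by unfold pvStepA; simp only [h]
    rw [h1]
    unfold pvStepA; simp only [h]
  | some i =>
    have h1 : pvStepA cat (k, v1) = cat.modify i (fun row => row.set 0 v1) := by
      unfold pvStepA; simp only [h]
    rw [h1]
    show (cat.modify i (fun row => row.set 0 v1)).modify i (fun row => row.set 0 v2)
      = pvStepA cat (k, v2)
    rw [pvModify_modify_same]
    unfold pvStepA; simp only [h]

theorem pvStepA_comm (cat : List (List String)) (k v k' v' : String) (hne : k ≠ k') :
    pvStepA (pvStepA cat (k, v)) (k', v') = pvStepA (pvStepA cat (k', v')) (k, v) := by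
  rw [pvStepA_eval (pvStepA cat (k, v)) cat (k', v') (pvThirds_stepA cat (k, v)),
      pvStepA_eval (pvStepA cat (k', v')) cat (k, v) (pvThirds_stepA cat (k', v'))]
  cases h : PySem.List.index? (cat.map (fun a => PySem.List.pyGet? a 2)) (some k) with
  | none =>
    have h1 : pvStepA cat (k, v) = cat := by unfold pvStepA; simp only [h]
    cases h' : PySem.List.index? (cat.map (fun a => PySem.List.pyGet? a 2)) (some k') with
    | none =>
      have h2 : pvStepA cat (k', v') = cat := by unfold pvStepA; simp only [h']
      rw [h1, h2]
    | some j =>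
      have h2 : pvStepA cat (k', v') = cat.modify j (fun row => row.set 0 v') := by
        unfold pvStepA; simp only [h']
      rw [h1, h2]
  | some i =>
    have h1 : pvStepA cat (k, v) = cat.modify i (fun row => row.set 0 v) := by
      unfold pvStepA; simp only [h]
    cases h' : PySem.List.index? (cat.map (fun a => PySem.List.pyGet? a 2)) (some k') with
    | none =>
      have h2 : pvStepA cat (k', v') = cat := by unfold pvStepA; simp only [h']
      rw [h1, h2]
    | some j =>
      have h2 : pvStepA cat (k', v') = cat.modify j (fun row => row.set 0 v') := by
        unfold pvStepA; simp only [h']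
      have hij : i ≠ j := by
        intro he
        obtain ⟨hi, hik, -⟩ := PySem.List.getElem_of_index?_eq_some h
        obtain ⟨hj, hjk, -⟩ := PySem.List.getElem_of_index?_eq_some h'
        subst he
        rw [hik] at hjk
        exact hne (by injection hjk)
      rw [h1, h2]
      show (cat.modify i (fun row => row.set 0 v)).modify j (fun row => row.set 0 v')
        = (cat.modify j (fun row => row.set 0 v')).modify i (fun row => row.set 0 v)
      exact pvModify_modify_comm _ i j _ _ hij

theorem pvFoldl_cons_of_ne (l : List (String × String)) (c : List (List String)) (k v : String)
    (h : ∀ p ∈ l, p.1 ≠ k) :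
    List.foldl pvStepA (pvStepA c (k, v)) l = pvStepA (List.foldl pvStepA c l) (k, v) := by
  induction l generalizing c with
  | nil => rfl
  | cons p rest ih =>
    obtain ⟨k1, v1⟩ := p
    have hk1 : k1 ≠ k := h (k1, v1) (by simp)
    simp only [List.foldl_cons]
    rw [pvStepA_comm c k v k1 v1 (fun e => hk1 e.symm)]
    exact ih _ (fun q hq => h q (List.mem_cons_of_mem _ hq))

theorem pvFoldl_collapse (l1 l2 : List (String × String)) (c : List (List String))
    (k v0 v : String) (h2 : ∀ p ∈ l2, p.1 ≠ k) :
    List.foldl pvStepA c (l1 ++ (k, v0) :: l2 ++ [(k, v)])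
      = List.foldl pvStepA c (l1 ++ (k, v) :: l2) := by
  simp only [List.foldl_append, List.foldl_cons, List.foldl_nil]
  rw [← pvFoldl_cons_of_ne l2 (pvStepA (List.foldl pvStepA c l1) (k, v0)) k v h2,
      pvStepA_same_key]

theorem pvDictStep (d : PySem.Dict String String) (k v : String) (cat : List (List String))
    (hnd : d.keys.Nodup) :
    List.foldl pvStepA cat (d.items ++ [(k, v)]) = List.foldl pvStepA cat (d.insert k v).items := by
  by_cases hc : d.contains k = true
  · have hkmem : k ∈ d.items.map (fun x => x.1) := (PySem.Dict.contains_iff_mem_keys d k).mp hc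
    obtain ⟨p, hp, hpk⟩ := List.mem_map.mp hkmem
    obtain ⟨l1, l2, hsplit⟩ := List.append_of_mem hp
    obtain ⟨kp, v0⟩ := p
    rw [show kp = k from hpk] at hsplit
    have hndfull : ((l1 ++ (k, v0) :: l2).map (fun x => x.1)).Nodup := by
      rw [← hsplit]; exact hnd
    rw [List.map_append, List.map_cons, List.nodup_append] at hndfull
    have hkcons := hndfull.2.1
    rw [List.nodup_cons] at hkcons
    have hkl2 : ∀ p ∈ l2, p.1 ≠ k := by
      intro p hp' he
      apply hkcons.1
      rw [← he]
      exact List.mem_map.mpr ⟨p, hp', rfl⟩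
    have hkl1 : ∀ p ∈ l1, p.1 ≠ k := by
      intro p hp' he
      exact hndfull.2.2 p.1 (List.mem_map.mpr ⟨p, hp', rfl⟩) k (by simp) he
    have hl1 : List.map (fun p => if (p.1 == k) = true then (k, v) else p) l1 = l1 := by
      conv_rhs => rw [← List.map_id l1]
      exact List.map_congr_left (fun q hq => by
        have hb : (q.1 == k) = false := beq_eq_false_iff_ne.mpr (hkl1 q hq)
        simp [hb])
    have hl2 : List.map (fun p => if (p.1 == k) = true then (k, v) else p) l2 = l2 := by
      conv_rhs => rw [← List.map_id l2]
      exact List.map_congr_left (fun q hq => by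
        have hb : (q.1 == k) = false := beq_eq_false_iff_ne.mpr (hkl2 q hq)
        simp [hb])
    have hins : (d.insert k v).items = l1 ++ (k, v) :: l2 := by
      rw [PySem.Dict.items_insert_of_contains d v hc, hsplit]
      simp only [List.map_append, List.map_cons, hl1, hl2]
      simp
    rw [hins, hsplit]
    exact pvFoldl_collapse l1 l2 cat k v0 v hkl2
  · rw [PySem.Dict.items_insert_of_not_contains d v (by simpa using hc)]

theorem pvFold_update (upd : List (String × String)) (d : PySem.Dict String String)
    (cat : List (List String)) (hnd : d.keys.Nodup) :
    List.foldl pvStepA cat (d.items ++ upd) = List.foldl pvStepA cat (d.update upd).items := by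
  induction upd generalizing d with
  | nil => simp [PySem.Dict.update]
  | cons kv rest ih =>
    obtain ⟨k, v⟩ := kv
    have : d.items ++ (k, v) :: rest = (d.items ++ [(k, v)]) ++ rest := by simp
    rw [this, List.foldl_append, pvDictStep d k v cat hnd, ← List.foldl_append,
        ih (d.insert k v) (PySem.Dict.nodup_keys_insert d k v hnd)]
    rfl

theorem pvFold_ofList (upd : List (String × String)) (cat : List (List String)) :
    List.foldl pvStepA cat upd = List.foldl pvStepA cat (PySem.Dict.ofList upd).items := by
  have := pvFold_update upd PySem.Dict.empty cat PySem.Dict.nodup_keys_empty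
  simpa [PySem.Dict.empty, PySem.Dict.ofList] using this

-- ===== VERDICT (by name: the statement is the Claim_ definition above) =====
theorem change_catagories_spec : Claim_equal_change_catagories := by
  intro cat upd _ hpre
  unfold Spec_change_catagories change_catagories change_catagories_alt
  rcases hpre with rfl | hrows
  · rw [show (PySem.Dict.ofList ([] : List (String × String))).items = [] from rfl,
        pvGoB_nil_rem]
    rfl
  · rw [pvFold_ofList upd cat]
    exact pvMain (PySem.Dict.ofList upd).items cat hrows (PySem.Dict.nodup_keys_ofList upd)
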